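-- pv_equiv track=rewrite | github.com/wolfram1293/Algorithm | others/syakutori.py | CI
-- ===== SOURCE A (Python) =====
-- def CI(A, M):
--     N = len(A)
--     count = [False] * M
--     for i in range(N):
--         if A[i] >= 0 and A[i] < M:
--             count[A[i]] = True
--
--     if all(count):
--         return True
--     else:
--         return False
-- ===== SOURCE B (Python) =====
-- def CI(A, M):
--     expected = 0
--     for x in sorted(A):
--         if x == expected:
--             expected += 1
--     return expected >= M
-- ===== Notes on version B (the rewrite author's own statement) =====
-- stated objective: alternative
-- what changed: B sorts A and does a single scan computing the mex (smallest nonnegative integer absent from A) via a running 'expected' counter, returning expected >= M, instead of marking a boolean array indexed by values and checking all flags.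
import Mathlib
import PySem

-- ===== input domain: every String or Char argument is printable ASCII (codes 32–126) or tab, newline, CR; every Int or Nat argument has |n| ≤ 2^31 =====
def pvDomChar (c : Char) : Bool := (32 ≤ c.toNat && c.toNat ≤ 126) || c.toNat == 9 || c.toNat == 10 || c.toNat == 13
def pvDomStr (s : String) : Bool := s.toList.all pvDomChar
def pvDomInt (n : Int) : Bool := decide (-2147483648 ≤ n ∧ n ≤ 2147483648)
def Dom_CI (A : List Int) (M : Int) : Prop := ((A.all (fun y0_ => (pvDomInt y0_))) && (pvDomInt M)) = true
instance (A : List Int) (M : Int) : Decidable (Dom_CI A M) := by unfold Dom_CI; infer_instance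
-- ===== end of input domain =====

-- B sorts A and computes the mex (smallest nonnegative integer absent from A) in one scan, returning mex >= M;
-- a different algorithm (sort-then-scan) than A's value-indexed boolean marking array, same return value.

-- ===== PORT A =====
def CI (A : List Int) (M : Int) : Bool :=
  let N : Int := A.length
  let count : List Bool := List.replicate M.toNat false
  let count := (PySem.List.pyRange 0 N 1).foldl (fun c i =>
      let ai := PySem.List.pyGetD A i 0
      if 0 ≤ ai ∧ ai < M then PySem.List.pySetD c ai true else c) count
  if count.all id then true else false

-- ===== PORT B =====
def CI_alt (A : List Int) (M : Int) : Bool :=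
  let expected : Int :=
    (PySem.List.sorted A (fun x => x) false).foldl (fun e x => if x = e then e + 1 else e) 0
  decide (M ≤ expected)

-- ===== PRECONDITION & SPEC =====
def Spec_CI (A : List Int) (M : Int) (out : Bool) : Prop := out = CI_alt A M
instance (A : List Int) (M : Int) (out : Bool) : Decidable (Spec_CI A M out) := by unfold Spec_CI; infer_instance

-- ===== CLAIM (what is proved, stated in full; the proofs are below) =====
def Claim_equal_CI : Prop := ∀ (A : List Int) (M : Int), Dom_CI A M → Spec_CI A M (CI A M)

-- ===== LEMMAS AND PROOFS =====

-- The scan step of B.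
def mexStep : Int → Int → Int := fun e x => if x = e then e + 1 else e

theorem mexScan_le (l : List Int) : ∀ e : Int, e ≤ l.foldl mexStep e := by
  induction l with
  | nil => intro e; simp
  | cons x l ih =>
    intro e
    simp only [List.foldl_cons, mexStep]
    split_ifs with h
    · exact le_trans (by omega) (ih (e + 1))
    · exact ih e

theorem mexScan_hit (l : List Int) : ∀ (e v : Int), e ≤ v → v < l.foldl mexStep e → v ∈ l := by
  induction l with
  | nil => intro e v h1 h2; simp at h2; omega
  | cons x l ih =>
    intro e v h1 h2
    simp only [List.foldl_cons, mexStep] at h2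
    split_ifs at h2 with h
    · rcases Decidable.eq_or_ne v e with he | hne
      · exact List.mem_cons.mpr (Or.inl (by omega))
      · exact List.mem_cons.mpr (Or.inr (ih (e + 1) v (by omega) h2))
    · exact List.mem_cons.mpr (Or.inr (ih e v h1 h2))

theorem mexScan_of_all_gt (l : List Int) : ∀ e : Int, (∀ y ∈ l, e < y) → l.foldl mexStep e = e := by
  induction l with
  | nil => intro e _; rfl
  | cons x l ih =>
    intro e h
    have hx : e < x := h x (List.mem_cons_self)
    simp only [List.foldl_cons, mexStep, if_neg (by omega : ¬ x = e)]
    exact ih e (fun y hy => h y (List.mem_cons_of_mem _ hy))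

theorem mexScan_not_mem (l : List Int) (hs : l.Pairwise (· ≤ ·)) :
    ∀ e : Int, l.foldl mexStep e ∉ l := by
  induction l with
  | nil => intro e; simp
  | cons x l ih =>
    intro e
    rcases List.pairwise_cons.mp hs with ⟨hx, hl⟩
    simp only [List.foldl_cons, mexStep]
    split_ifs with h
    · intro hmem
      rcases List.mem_cons.mp hmem with he | hmem
      · have := mexScan_le l (e + 1); omega
      · exact ih hl (e + 1) hmem
    · rcases Int.lt_or_le e x with hlt | hle
      · have hall : ∀ y ∈ l, e < y := fun y hy => lt_of_lt_of_le hlt (hx y hy)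
        rw [mexScan_of_all_gt l e hall]
        intro hmem
        rcases List.mem_cons.mp hmem with he | hmem
        · omega
        · exact absurd (hall _ hmem) (by omega)
      · intro hmem
        rcases List.mem_cons.mp hmem with he | hmem
        · have := mexScan_le l e; omega
        · exact ih hl e hmem

theorem CI_alt_true_iff (A : List Int) (M : Int) :
    CI_alt A M = true ↔ ∀ v : Int, 0 ≤ v → v < M → v ∈ A := by
  unfold CI_alt
  set s := PySem.List.sorted A (fun x => x) false with hs
  have hmem : ∀ v : Int, v ∈ s ↔ v ∈ A := fun v => PySem.List.mem_sorted A (fun x => x) false v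
  have hpw : s.Pairwise (· ≤ ·) := by
    have := PySem.List.sorted_pairwise (xs := A) (key := fun x : Int => x)
    simpa using this
  rw [decide_eq_true_iff]
  change M ≤ s.foldl mexStep 0 ↔ _
  constructor
  · intro h v hv0 hvM
    exact (hmem v).mp (mexScan_hit s 0 v hv0 (by omega))
  · intro h
    by_contra hlt
    push Not at hlt
    have h0 : (0:Int) ≤ s.foldl mexStep 0 := mexScan_le s 0
    have hin : s.foldl mexStep 0 ∈ A := h _ h0 hlt
    exact mexScan_not_mem s hpw 0 ((hmem _).mpr hin)

theorem CI_mark_getD (M : Int) (A : List Int) : ∀ (c : List Bool) (j : Nat), j < c.length →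
    ((A.foldl (fun c ai => if 0 ≤ ai ∧ ai < M then PySem.List.pySetD c ai true else c) c).getD j false)
      = (c.getD j false || decide ((j : Int) ∈ A ∧ 0 ≤ (j:Int) ∧ (j:Int) < M)) := by
  induction A with
  | nil => intro c j hj; simp
  | cons a A ih =>
    intro c j hj
    simp only [List.foldl_cons]
    by_cases h : 0 ≤ a ∧ a < M
    · rw [if_pos h, ih]
      · rw [PySem.List.pySetD_of_nonneg _ _ h.1]
        rcases Decidable.eq_or_ne (j : Int) a with he | hne
        · have ha : a.toNat = j := by omega
          subst ha
          have hj2 : a.toNat < (c.set a.toNat true).length := by simpa using hj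
          rw [List.getD_eq_getElem _ _ hj2, List.getElem_set_self]
          simp [List.mem_cons, he, h.1, h.2]
        · have hne' : a.toNat ≠ j := by omega
          rw [show ((c.set a.toNat true).getD j false) = c.getD j false by
            simp [List.getD, List.getElem?_set_ne hne']]
          congr 1
          simp only [List.mem_cons, decide_eq_decide]
          constructor
          · rintro ⟨hmem, h2⟩; exact ⟨Or.inr hmem, h2⟩
          · rintro ⟨he | hmem, h2⟩
            · exact absurd he hne
            · exact ⟨hmem, h2⟩
      · rw [PySem.List.pySetD_of_nonneg _ _ h.1]; simpa using hj
    · rw [if_neg h, ih _ _ hj]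
      congr 1
      simp only [List.mem_cons, decide_eq_decide]
      constructor
      · rintro ⟨hmem, h2⟩; exact ⟨Or.inr hmem, h2⟩
      · rintro ⟨he | hmem, h2⟩
        · exact absurd (he ▸ h2) h
        · exact ⟨hmem, h2⟩

theorem CI_true_iff (A : List Int) (M : Int) :
    CI A M = true ↔ ∀ v : Int, 0 ≤ v → v < M → v ∈ A := by
  unfold CI
  simp only []
  rw [PySem.List.foldl_pyRange_zero_pyGetD' A 0
      (fun c ai => if 0 ≤ ai ∧ ai < M then PySem.List.pySetD c ai true else c)
      (List.replicate M.toNat false)]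
  have hlen : ∀ (B : List Int) (c : List Bool),
      (B.foldl (fun c ai => if 0 ≤ ai ∧ ai < M then PySem.List.pySetD c ai true else c) c).length
        = c.length := by
    intro B
    induction B with
    | nil => intro c; rfl
    | cons a B ih =>
      intro c
      simp only [List.foldl_cons]
      rw [ih]
      by_cases h : 0 ≤ a ∧ a < M
      · rw [if_pos h, PySem.List.pySetD_of_nonneg _ _ h.1, List.length_set]
      · rw [if_neg h]
  set res := A.foldl (fun c ai => if 0 ≤ ai ∧ ai < M then PySem.List.pySetD c ai true else c)
      (List.replicate M.toNat false) with hres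
  have hrl : res.length = M.toNat := by rw [hres, hlen, List.length_replicate]
  constructor
  · intro h v hv0 hvM
    split_ifs at h with hall
    · have hj : v.toNat < res.length := by omega
      have hltM : v.toNat < M.toNat := by omega
      have hmk := CI_mark_getD M A (List.replicate M.toNat false) v.toNat
        (by simpa [List.length_replicate] using hltM)
      rw [← hres] at hmk
      have hget : res.getD v.toNat false = true := by
        rw [List.getD_eq_getElem _ _ hj]
        simpa using List.all_eq_true.mp hall _ (List.getElem_mem hj)
      rw [hget] at hmk
      have hv : ((v.toNat : Int)) = v := by omega
      rw [eq_comm, Bool.or_eq_true, decide_eq_true_iff, hv] at hmk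
      rcases hmk with hmk | hmk
      · simp at hmk
      · exact hmk.1
  · intro h
    have hall : res.all id = true := by
      rw [List.all_eq_true]
      intro b hb
      obtain ⟨j, hj, hbj⟩ := List.mem_iff_getElem.mp hb
      have hjN : j < M.toNat := by omega
      have hmk := CI_mark_getD M A (List.replicate M.toNat false) j
        (by simpa [List.length_replicate] using hjN)
      rw [← hres] at hmk
      have hjM : (j:Int) < M := by omega
      have hmem : (j:Int) ∈ A := h _ (by positivity) hjM
      rw [List.getD_eq_getElem _ _ hj, hbj] at hmk
      simp [hmem, hjM] at hmk
      simp [hmk]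
    simp [hall]

-- ===== VERDICT (by name: the statement is the Claim_ definition above) =====
theorem CI_spec : Claim_equal_CI := by
  intro A M _
  unfold Spec_CI
  rw [Bool.eq_iff_iff, CI_true_iff, CI_alt_true_iff]
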